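-- pv_equiv track=rewrite | github.com/google-deepmind/sonnet | sonnet/python/modules/nets/alexnet.py | _calc_min_size
-- ===== SOURCE A (Python) =====
-- def _calc_min_size(conv_layers):
--   """Calculates the minimum size of the input layer.
--
--   Given a set of convolutional layers, calculate the minimum value of
--   the `input_height` and `input_width`, i.e. such that the output has
--   size 1x1. Assumes snt.VALID padding.
--
--   Args:
--     conv_layers: List of tuples `(output_channels, (kernel_size, stride),
--       (pooling_size, pooling_stride))`
--
--   Returns:
--     Minimum value of input height and width.
--   """
--   input_size = 1
--
--   for _, conv_params, max_pooling in reversed(conv_layers):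
--     if max_pooling is not None:
--       kernel_size, stride = max_pooling
--       input_size = input_size * stride + (kernel_size - stride)
--
--     if conv_params is not None:
--       kernel_size, stride = conv_params
--       input_size = input_size * stride + (kernel_size - stride)
--
--   return input_size
-- ===== SOURCE B (Python) =====
-- def _calc_min_size(conv_layers):
--   """Minimum input size via forward composition of affine maps."""
--   scale, offset = 1, 0
--   for _, conv_params, max_pooling in conv_layers:
--     for op in (conv_params, max_pooling):
--       if op is not None:
--         kernel_size, stride = op
--         scale, offset = scale * stride, scale * (kernel_size - stride) + offset
--   return scale + offset
-- ===== Notes on version B (the rewrite author's own statement) =====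
-- stated objective: alternative
-- what changed: Replaces the reversed() fold over a single running size with a front-to-back pass composing affine maps, maintaining a (scale, offset) pair and returning scale + offset.
import Mathlib
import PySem

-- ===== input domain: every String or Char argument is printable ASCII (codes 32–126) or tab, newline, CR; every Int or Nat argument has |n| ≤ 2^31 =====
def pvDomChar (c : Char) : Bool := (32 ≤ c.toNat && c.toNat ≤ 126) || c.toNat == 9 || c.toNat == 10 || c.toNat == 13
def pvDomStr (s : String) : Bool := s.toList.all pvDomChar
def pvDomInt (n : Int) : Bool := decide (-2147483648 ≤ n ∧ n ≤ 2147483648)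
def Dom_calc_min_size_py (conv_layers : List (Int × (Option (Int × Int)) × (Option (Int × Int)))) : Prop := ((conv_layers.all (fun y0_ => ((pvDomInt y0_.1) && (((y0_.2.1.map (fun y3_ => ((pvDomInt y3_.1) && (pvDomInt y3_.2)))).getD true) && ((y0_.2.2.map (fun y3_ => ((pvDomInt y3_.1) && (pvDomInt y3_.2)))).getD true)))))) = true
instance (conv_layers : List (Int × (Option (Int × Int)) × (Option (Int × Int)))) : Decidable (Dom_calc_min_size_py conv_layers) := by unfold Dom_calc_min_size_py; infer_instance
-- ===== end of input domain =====

-- B replaces A's reversed() fold of one running size by a front-to-back pass composing affine maps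
-- (a scale/offset pair), returning scale + offset: an alternative decomposition, same O(n) cost.


-- ===== PORT A =====
-- literal port of A: iterate reversed(conv_layers), pooling update then conv update
def calc_min_size_py (conv_layers : List (Int × (Option (Int × Int)) × (Option (Int × Int)))) : Int :=
  conv_layers.reverse.foldl
    (fun input_size layer =>
      let s1 :=
        match layer.2.2 with
        | some (kernel_size, stride) => input_size * stride + (kernel_size - stride)
        | none => input_size
      match layer.2.1 with
      | some (kernel_size, stride) => s1 * stride + (kernel_size - stride)
      | none => s1)
    1

-- ===== PORT B =====
-- one affine-map update step: (scale, offset) composed with op v ↦ stride*v + (kernel-stride)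
def cmsOpStep (ac : Int × Int) (op : Option (Int × Int)) : Int × Int :=
  match op with
  | some (kernel_size, stride) => (ac.1 * stride, ac.1 * (kernel_size - stride) + ac.2)
  | none => ac

-- literal port of B: front-to-back fold maintaining (scale, offset), inner fold over [conv, pool]
def calc_min_size_py_alt (conv_layers : List (Int × (Option (Int × Int)) × (Option (Int × Int)))) : Int :=
  let p := conv_layers.foldl
    (fun acc layer => [layer.2.1, layer.2.2].foldl cmsOpStep acc)
    ((1 : Int), (0 : Int))
  p.1 + p.2

-- ===== PRECONDITION & SPEC =====
def Spec_calc_min_size_py (conv_layers : List (Int × (Option (Int × Int)) × (Option (Int × Int)))) (out : Int) : Prop := out = calc_min_size_py_alt conv_layers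
instance (conv_layers : List (Int × (Option (Int × Int)) × (Option (Int × Int)))) (out : Int) : Decidable (Spec_calc_min_size_py conv_layers out) := by unfold Spec_calc_min_size_py; infer_instance

-- ===== CLAIM (what is proved, stated in full; the proofs are below) =====
def Claim_equal_calc_min_size_py : Prop := ∀ (conv_layers : List (Int × (Option (Int × Int)) × (Option (Int × Int)))), Dom_calc_min_size_py conv_layers → Spec_calc_min_size_py conv_layers (calc_min_size_py conv_layers)

-- ===== LEMMAS AND PROOFS =====

-- A's per-layer step (pooling then conv), as applied by the reversed fold
def cmsStepA (input_size : Int) (layer : Int × (Option (Int × Int)) × (Option (Int × Int))) : Int :=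
  let s1 :=
    match layer.2.2 with
    | some (kernel_size, stride) => input_size * stride + (kernel_size - stride)
    | none => input_size
  match layer.2.1 with
  | some (kernel_size, stride) => s1 * stride + (kernel_size - stride)
  | none => s1

-- B's per-layer update of the affine pair represents composition with A's step
theorem cmsOpStep_layer (ac : Int × Int)
    (layer : Int × (Option (Int × Int)) × (Option (Int × Int))) (w : Int) :
    ([layer.2.1, layer.2.2].foldl cmsOpStep ac).1 * w
      + ([layer.2.1, layer.2.2].foldl cmsOpStep ac).2
    = ac.1 * cmsStepA w layer + ac.2 := by
  obtain ⟨_, c, p⟩ := layer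
  cases c <;> cases p <;>
    simp [cmsOpStep, cmsStepA] <;> ring

-- the accumulated affine pair evaluates A's backward fold
theorem cms_fold (conv_layers : List (Int × (Option (Int × Int)) × (Option (Int × Int))))
    (ac : Int × Int) (v : Int) :
    (conv_layers.foldl (fun acc layer => [layer.2.1, layer.2.2].foldl cmsOpStep acc) ac).1 * v
      + (conv_layers.foldl (fun acc layer => [layer.2.1, layer.2.2].foldl cmsOpStep acc) ac).2
    = ac.1 * (conv_layers.foldr (fun layer s => cmsStepA s layer) v) + ac.2 := by
  induction conv_layers generalizing ac with
  | nil => simp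
  | cons l ls ih =>
    rw [List.foldl_cons, List.foldr_cons, ih]
    exact cmsOpStep_layer ac l _

-- ===== VERDICT (by name: the statement is the Claim_ definition above) =====
theorem calc_min_size_py_spec : Claim_equal_calc_min_size_py := by
  intro conv_layers _
  unfold Spec_calc_min_size_py calc_min_size_py calc_min_size_py_alt
  have h := cms_fold conv_layers (1, 0) 1
  simp only [mul_one, one_mul, add_zero] at h
  rw [h, List.foldl_reverse]
  rfl
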